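-- pv_equiv track=rewrite | github.com/deysantanu84/python-portfolio | problemSolving/searching/maximumStaircaseHeight.py | maxStaircaseHeight
-- ===== SOURCE A (Python) =====
-- def maxStaircaseHeight(A):
--     if A == 0:
--         return A
--
--     start = 1
--     end = A
--     result = 1
--     while start <= end:
--         mid = start + (end - start) // 2
--         if (mid * (mid + 1)) / 2 <= A:
--             result = mid
--             start = mid + 1
--         else:
--             end = mid - 1
--     return result
-- ===== SOURCE B (Python) =====
-- def maxStaircaseHeight(A):
--     # Simpler linear scan: climb one step at a time while the next
--     # triangular number still fits (same float /2 comparison as A).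
--     if A == 0:
--         return A
--     n = 1
--     while ((n + 1) * (n + 2)) / 2 <= A:
--         n += 1
--     return n
-- ===== Notes on version B (the rewrite author's own statement) =====
-- stated objective: simpler
-- what changed: Replaces A's binary search over [1,A] (three loop variables, midpoint arithmetic) with a plain linear climb that increments n while the next triangular number still fits, keeping the A==0 guard.
import Mathlib
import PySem

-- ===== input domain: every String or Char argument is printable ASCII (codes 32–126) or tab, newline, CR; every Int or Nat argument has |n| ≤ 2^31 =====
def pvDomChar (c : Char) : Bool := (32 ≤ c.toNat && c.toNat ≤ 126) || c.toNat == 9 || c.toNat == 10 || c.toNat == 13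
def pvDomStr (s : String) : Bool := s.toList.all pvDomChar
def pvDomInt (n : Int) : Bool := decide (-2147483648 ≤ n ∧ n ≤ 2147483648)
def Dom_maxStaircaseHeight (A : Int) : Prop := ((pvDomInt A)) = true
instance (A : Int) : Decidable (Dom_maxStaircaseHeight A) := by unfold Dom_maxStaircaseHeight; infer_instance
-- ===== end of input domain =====

-- B replaces A's binary search by a simple linear climb; objective: simpler (not faster).

-- ===== PORT A =====
-- Python compares the float (mid*(mid+1))/2 against A; for |A| ≤ 2^31 this comparison
-- is exact (whenever the two sides are close enough for float rounding to matter the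
-- product is below 2^53), so it is ported as the integer comparison mid*(mid+1) ≤ 2*A.
def maxStaircaseHeightGoA (A start end_ result : Int) : Int :=
  if _h : start ≤ end_ then
    let mid := start + PySem.Int.floordiv (end_ - start) 2
    if mid * (mid + 1) ≤ 2 * A then
      maxStaircaseHeightGoA A (mid + 1) end_ mid
    else
      maxStaircaseHeightGoA A start (mid - 1) result
  else result
termination_by (end_ - start + 1).toNat
decreasing_by
  all_goals
    have hd : PySem.Int.floordiv (end_ - start) 2 = (end_ - start) / 2 :=
      PySem.Int.floordiv_eq_ediv_of_pos (by omega)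
    rw [hd]
    omega

def maxStaircaseHeight (A : Int) : Int :=
  if A = 0 then A
  else maxStaircaseHeightGoA A 1 A 1

-- ===== PORT B =====
-- same exactness note as for A: the float comparison ((n+1)*(n+2))/2 <= A is ported
-- as the integer comparison (n+1)*(n+2) ≤ 2*A, exact for |A| ≤ 2^31.
def maxStaircaseHeightGoB (A n : Int) : Int :=
  if (n + 1) * (n + 2) ≤ 2 * A then maxStaircaseHeightGoB A (n + 1) else n
termination_by (A - n).toNat
decreasing_by
  have h0 : 0 ≤ (n + 1) * (n + 2) := by
    rcases (show 0 ≤ n + 1 ∨ n + 1 < 0 from by omega) with h | h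
    · nlinarith
    · nlinarith
  rcases (show 0 ≤ n ∨ n < 0 from by omega) with h | h
  · have : 2 * n + 2 ≤ (n + 1) * (n + 2) := by nlinarith
    omega
  · omega

def maxStaircaseHeight_alt (A : Int) : Int :=
  if A = 0 then A
  else maxStaircaseHeightGoB A 1

-- ===== PRECONDITION & SPEC =====
def Spec_maxStaircaseHeight (A : Int) (out : Int) : Prop := out = maxStaircaseHeight_alt A
instance (A : Int) (out : Int) : Decidable (Spec_maxStaircaseHeight A out) := by unfold Spec_maxStaircaseHeight; infer_instance

-- ===== CLAIM (what is proved, stated in full; the proofs are below) =====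
def Claim_equal_maxStaircaseHeight : Prop := ∀ (A : Int), Dom_maxStaircaseHeight A → Spec_maxStaircaseHeight A (maxStaircaseHeight A)

-- ===== LEMMAS AND PROOFS =====

-- the triangular predicate n*(n+1) ≤ 2*A is downward closed on positives
lemma tri_mono {A a b : Int} (ha : 1 ≤ a) (hab : a ≤ b) (hb : b * (b + 1) ≤ 2 * A) :
    a * (a + 1) ≤ 2 * A := by nlinarith

-- B's loop returns some r ≥ 1 with P r and ¬P (r+1)
lemma goB_spec (A : Int) : ∀ n : Int, 1 ≤ n → n * (n + 1) ≤ 2 * A →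
    1 ≤ maxStaircaseHeightGoB A n ∧
    (maxStaircaseHeightGoB A n) * (maxStaircaseHeightGoB A n + 1) ≤ 2 * A ∧
    ¬ ((maxStaircaseHeightGoB A n + 1) * (maxStaircaseHeightGoB A n + 2) ≤ 2 * A) := by
  intro n
  induction n using maxStaircaseHeightGoB.induct (A := A) with
  | case1 n hcond ih =>
    intro hn hP
    rw [maxStaircaseHeightGoB, if_pos hcond]
    exact ih (by omega) (by nlinarith)
  | case2 n hcond =>
    intro hn hP
    rw [maxStaircaseHeightGoB, if_neg hcond]
    exact ⟨hn, hP, hcond⟩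

-- A's binary search maintains: P result, ¬P (end_+1), start-1 ≤ result, 1 ≤ start, result
lemma goA_spec (A : Int) : ∀ start end_ result : Int,
    1 ≤ start → 0 ≤ end_ → 1 ≤ result → start - 1 ≤ result →
    result * (result + 1) ≤ 2 * A → ¬ ((end_ + 1) * (end_ + 2) ≤ 2 * A) →
    1 ≤ maxStaircaseHeightGoA A start end_ result ∧
    (maxStaircaseHeightGoA A start end_ result) * (maxStaircaseHeightGoA A start end_ result + 1) ≤ 2 * A ∧
    ¬ ((maxStaircaseHeightGoA A start end_ result + 1) * (maxStaircaseHeightGoA A start end_ result + 2) ≤ 2 * A) := by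
  intro s e r
  induction s, e, r using maxStaircaseHeightGoA.induct (A := A) with
  | case1 start end_ result hle mid hcond ih =>
    intro hs he hr1 hrs hPr hPe
    have hd : PySem.Int.floordiv (end_ - start) 2 = (end_ - start) / 2 :=
      PySem.Int.floordiv_eq_ediv_of_pos (by omega)
    have hm : mid = start + (end_ - start) / 2 := by rw [← hd]
    have hmid1 : start ≤ mid := by rw [hm]; omega
    have hmid2 : mid ≤ end_ := by rw [hm]; omega
    rw [maxStaircaseHeightGoA, dif_pos hle]
    rw [hd, ← hm, if_pos hcond]
    exact ih (by omega) he (by omega) (by omega) hcond hPe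
  | case2 start end_ result hle mid hcond ih =>
    intro hs he hr1 hrs hPr hPe
    have hd : PySem.Int.floordiv (end_ - start) 2 = (end_ - start) / 2 :=
      PySem.Int.floordiv_eq_ediv_of_pos (by omega)
    have hm : mid = start + (end_ - start) / 2 := by rw [← hd]
    have hmid1 : start ≤ mid := by rw [hm]; omega
    have hmid2 : mid ≤ end_ := by rw [hm]; omega
    rw [maxStaircaseHeightGoA, dif_pos hle]
    rw [hd, ← hm, if_neg hcond]
    refine ih hs (by omega) hr1 hrs hPr ?_
    have : mid - 1 + 1 = mid := by omega
    rw [this]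
    intro hc
    exact hcond (by nlinarith [hc])
  | case3 start end_ result hle =>
    intro hs he hr1 hrs hPr hPe
    rw [maxStaircaseHeightGoA, dif_neg hle]
    refine ⟨hr1, hPr, fun hc => hPe ?_⟩
    have := tri_mono (A := A) (a := end_ + 1) (b := result + 1) (by omega) (by omega) (by nlinarith [hc])
    nlinarith [this]

-- any two values with P r ∧ ¬P (r+1), r ≥ 1 coincide
lemma tri_unique {A r r' : Int} (h1 : 1 ≤ r) (h2 : r * (r + 1) ≤ 2 * A)
    (h3 : ¬ ((r + 1) * (r + 2) ≤ 2 * A))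
    (h1' : 1 ≤ r') (h2' : r' * (r' + 1) ≤ 2 * A)
    (h3' : ¬ ((r' + 1) * (r' + 2) ≤ 2 * A)) : r = r' := by
  rcases lt_trichotomy r r' with h | h | h
  · exact absurd (by nlinarith [tri_mono (A := A) (a := r + 1) (b := r') (by omega) (by omega) h2'] :
      (r + 1) * (r + 2) ≤ 2 * A) h3
  · exact h
  · exact absurd (by nlinarith [tri_mono (A := A) (a := r' + 1) (b := r) (by omega) (by omega) h2] :
      (r' + 1) * (r' + 2) ≤ 2 * A) h3'

-- ===== VERDICT (by name: the statement is the Claim_ definition above) =====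
theorem maxStaircaseHeight_spec : Claim_equal_maxStaircaseHeight := by
  intro A _
  unfold Spec_maxStaircaseHeight maxStaircaseHeight maxStaircaseHeight_alt
  by_cases hA : A = 0
  · simp [hA]
  · rw [if_neg hA, if_neg hA]
    by_cases h1 : 1 ≤ A
    · have hB := goB_spec A 1 le_rfl (by nlinarith)
      have hA' := goA_spec A 1 A 1 le_rfl (by omega) le_rfl (by omega)
        (by nlinarith) (by nlinarith)
      exact tri_unique hA'.1 hA'.2.1 hA'.2.2 hB.1 hB.2.1 hB.2.2
    · -- A < 0: A's loop never runs (1 > A), B's condition 6 ≤ 2A fails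
      rw [maxStaircaseHeightGoA, dif_neg h1, maxStaircaseHeightGoB,
        if_neg (by nlinarith)]
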